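-- pv_equiv track=rewrite | github.com/Azure/cyclecloud-slurm | azure-slurm/exporter/parsers.py | condense_nodelist
-- ===== SOURCE A (Python) =====
-- from collections import defaultdict
-- from typing import Dict, List, Any, Optional
--
-- def condense_nodelist(node_names: List[str]) -> str:
--     """
--     Condense a list of node names into Slurm nodelist format.
--
--     Examples:
--         ['node-1', 'node-2', 'node-3'] -> 'node-[1-3]'
--         ['node-1', 'node-3', 'node-5'] -> 'node-[1,3,5]'
--         ['hpc-1', 'hpc-2', 'htc-1'] -> 'hpc-[1-2],htc-1'
--
--     Args:
--         node_names: List of node names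
--
--     Returns:
--         Condensed nodelist string
--     """
--     if not node_names:
--         return ""
--
--     if len(node_names) == 1:
--         return node_names[0]
--
--     # Group nodes by prefix
--     prefix_groups = defaultdict(list)
--     for name in sorted(node_names):
--         # Split name into prefix and number
--         parts = name.rsplit('-', 1)
--         if len(parts) == 2 and parts[1].isdigit():
--             prefix = parts[0]
--             number = int(parts[1])
--             prefix_groups[prefix].append(number)
--         else:
--             # Non-numeric suffix, keep as-is
--             prefix_groups[name].append(None)
--
--     # Condense each prefix group
--     condensed_parts = []
--     for prefix in sorted(prefix_groups.keys()):
--         numbers = prefix_groups[prefix]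
--
--         # If None in list, this is a literal name
--         if None in numbers:
--             condensed_parts.append(prefix)
--             continue
--
--         # Sort numbers
--         numbers = sorted(set(numbers))
--
--         if len(numbers) == 1:
--             condensed_parts.append(f"{prefix}-{numbers[0]}")
--         else:
--             # Find consecutive ranges
--             ranges = []
--             start = numbers[0]
--             end = numbers[0]
--
--             for i in range(1, len(numbers)):
--                 if numbers[i] == end + 1:
--                     end = numbers[i]
--                 else:
--                     if start == end:
--                         ranges.append(str(start))
--                     else:
--                         ranges.append(f"{start}-{end}")
--                     start = numbers[i]
--                     end = numbers[i]
--
--             # Add final range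
--             if start == end:
--                 ranges.append(str(start))
--             else:
--                 ranges.append(f"{start}-{end}")
--
--             condensed_parts.append(f"{prefix}-[{','.join(ranges)}]")
--
--     return ','.join(condensed_parts)
-- ===== SOURCE B (Python) =====
-- # B: no pre-sort and no defaultdict: classify each name once into (key, number-or-None),
-- # group with one dict pass, and emit consecutive runs via run-boundary filters
-- # (n-1 / n+1 set membership) zipped together instead of an index sweep with accumulators.
--
-- def _classify(name):
--     prefix, sep, suffix = name.rpartition('-')
--     if sep and suffix.isdigit():
--         return prefix, int(suffix)
--     return name, None
--
--
-- def condense_nodelist(node_names):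
--     if not node_names:
--         return ""
--     if len(node_names) == 1:
--         return node_names[0]
--
--     groups = {}
--     for name in node_names:
--         k, n = _classify(name)
--         groups.setdefault(k, []).append(n)
--
--     parts = []
--     for key in sorted(groups):
--         vals = set(groups[key])
--         if None in vals:
--             parts.append(key)
--             continue
--         ns = sorted(vals)
--         if len(ns) == 1:
--             parts.append(f"{key}-{ns[0]}")
--         else:
--             starts = [n for n in ns if n - 1 not in vals]
--             ends = [n for n in ns if n + 1 not in vals]
--             runs = [str(a) if a == b else f"{a}-{b}" for a, b in zip(starts, ends)]
--             parts.append(f"{key}-[{','.join(runs)}]")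
--     return ",".join(parts)
-- ===== Notes on version B (the rewrite author's own statement) =====
-- stated objective: alternative
-- what changed: B drops A's input pre-sort and defaultdict: it classifies each name once into a (key, number-or-None) pair with rpartition, groups those pairs in one plain-dict pass, and emits consecutive ranges by zipping run starts (n-1 not in the value set) with run ends (n+1 not in the value set) instead of A's index sweep with start/end accumulators.
import Mathlib
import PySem

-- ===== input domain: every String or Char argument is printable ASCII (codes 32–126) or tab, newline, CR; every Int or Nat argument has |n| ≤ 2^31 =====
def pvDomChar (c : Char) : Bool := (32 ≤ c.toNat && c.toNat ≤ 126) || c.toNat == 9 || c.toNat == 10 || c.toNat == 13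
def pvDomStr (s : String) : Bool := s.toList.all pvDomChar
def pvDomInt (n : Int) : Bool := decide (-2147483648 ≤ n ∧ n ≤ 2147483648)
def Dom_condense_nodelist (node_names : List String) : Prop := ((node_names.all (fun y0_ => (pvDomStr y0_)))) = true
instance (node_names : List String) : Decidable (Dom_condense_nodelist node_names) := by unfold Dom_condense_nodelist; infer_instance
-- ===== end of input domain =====

-- B replaces A's sorted-input defaultdict grouping and index sweep by a one-shot classification list,
-- per-key value sets and run boundaries found by set membership (objective: alternative decomposition).

-- ===== PORT A =====

-- hand port of name.rsplit('-', 1): split at the LAST '-' if any (exact: maxsplit=1 from the right)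
def rsplitDash1 (cs : List Char) : List (List Char) :=
  let i := PySem.Chars.rfind cs ['-']
  if i == -1 then [cs]
  else [PySem.List.slice cs none (some i), PySem.List.slice cs (some (i + 1)) none]

def condense_nodelist (node_names : List String) : String :=
  if node_names.isEmpty then ""
  else if node_names.length == 1 then node_names.headD ""
  else
    let prefix_groups : PySem.Dict String (List (Option Int)) :=
      (PySem.List.sorted node_names (fun x => x)).foldl (fun d name =>
        let parts := rsplitDash1 name.toList
        if parts.length == 2 && PySem.Chars.strIsdigit (parts.getD 1 []) then
          -- int(parts[1]) cannot fail on an isdigit string; .getD 0 is never taken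
          d.modify (String.ofList (parts.getD 0 [])) []
            (fun l => l ++ [some ((PySem.Int.ofChars? (parts.getD 1 [])).getD 0)])
        else
          d.modify name [] (fun l => l ++ [none])) PySem.Dict.empty
    let condensed_parts : List String :=
      (PySem.List.sorted prefix_groups.keys (fun x => x)).foldl (fun acc pfx =>
        let numbers := prefix_groups.getD pfx []
        if numbers.contains none then acc ++ [pfx]
        else
          -- here every element of numbers is an int; sorted(set(numbers)) on those ints
          let nums := PySem.List.sorted (PySem.Set.ofList (numbers.filterMap (fun x => x))) (fun x => x)
          if nums.length == 1 then acc ++ [pfx ++ "-" ++ PySem.Int.toStr (nums.headD 0)]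
          else
            let st0 := nums.headD 0
            let state :=
              (PySem.List.pyRange 1 (PySem.List.len nums)).foldl
                (fun (st : List String × Int × Int) i =>
                  let ni := PySem.List.pyGetD nums i 0
                  if ni == st.2.2 + 1 then (st.1, st.2.1, ni)
                  else
                    (st.1 ++ [if st.2.1 == st.2.2 then PySem.Int.toStr st.2.1
                              else PySem.Int.toStr st.2.1 ++ "-" ++ PySem.Int.toStr st.2.2], ni, ni))
                ([], st0, st0)
            let ranges := state.1 ++ [if state.2.1 == state.2.2 then PySem.Int.toStr state.2.1
                                      else PySem.Int.toStr state.2.1 ++ "-" ++ PySem.Int.toStr state.2.2]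
            acc ++ [pfx ++ "-[" ++ PySem.Str.join "," ranges ++ "]"]) []
    PySem.Str.join "," condensed_parts

-- ===== PORT B =====

-- port of Source B's _classify: rpartition at the last '-' (hand port of rpartition, exact)
def classifyAlt (name : String) : String × Option Int :=
  let cs := name.toList
  let i := PySem.Chars.rfind cs ['-']
  if i == -1 then (name, none)
  else
    let suffix := PySem.List.slice cs (some (i + 1)) none
    if PySem.Chars.strIsdigit suffix then
      (String.ofList (PySem.List.slice cs none (some i)), some ((PySem.Int.ofChars? suffix).getD 0))
    else (name, none)

def condense_nodelist_alt (node_names : List String) : String :=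
  if node_names.isEmpty then ""
  else if node_names.length == 1 then node_names.headD ""
  else
    let groups : PySem.Dict String (List (Option Int)) :=
      node_names.foldl (fun d name =>
        -- groups.setdefault(k, []).append(n)
        d.modify (classifyAlt name).1 [] (fun l => l ++ [(classifyAlt name).2])) PySem.Dict.empty
    let parts : List String :=
      (PySem.List.sorted groups.keys (fun x => x)).foldl
        (fun acc key =>
          let vals : PySem.Set (Option Int) := PySem.Set.ofList (groups.getD key [])
          if vals.contains none then acc ++ [key]
          else
            -- all members of vals are ints here; sorted(vals) sorts those ints
            let ns := PySem.List.sorted (vals.filterMap (fun x => x)) (fun x => x)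
            if ns.length == 1 then acc ++ [key ++ "-" ++ PySem.Int.toStr (ns.headD 0)]
            else
              let starts := ns.filter (fun n => !(vals.contains (some (n - 1))))
              let ends := ns.filter (fun n => !(vals.contains (some (n + 1))))
              let runs := (starts.zip ends).map (fun ab =>
                if ab.1 == ab.2 then PySem.Int.toStr ab.1
                else PySem.Int.toStr ab.1 ++ "-" ++ PySem.Int.toStr ab.2)
              acc ++ [key ++ "-[" ++ PySem.Str.join "," runs ++ "]"]) []
    PySem.Str.join "," parts

-- ===== PRECONDITION & SPEC =====
def Spec_condense_nodelist (node_names : List String) (out : String) : Prop := out = condense_nodelist_alt node_names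
instance (node_names : List String) (out : String) : Decidable (Spec_condense_nodelist node_names out) := by unfold Spec_condense_nodelist; infer_instance

-- ===== CLAIM (what is proved, stated in full; the proofs are below) =====
def Claim_equal_condense_nodelist : Prop := ∀ (node_names : List String), Dom_condense_nodelist node_names → Spec_condense_nodelist node_names (condense_nodelist node_names)

-- ===== LEMMAS AND PROOFS =====

def renderRun (p : Int × Int) : String :=
  if p.1 == p.2 then PySem.Int.toStr p.1 else PySem.Int.toStr p.1 ++ "-" ++ PySem.Int.toStr p.2

def runsFrom (s e : Int) : List Int → List (Int × Int)
  | [] => [(s, e)]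
  | x :: t => if x = e + 1 then runsFrom s x t else (s, e) :: runsFrom x x t
def runEnd (e : Int) : List Int → Int
  | [] => e
  | x :: t => if x = e + 1 then runEnd x t else e
def runRest (e : Int) : List Int → List (Int × Int)
  | [] => []
  | x :: t => if x = e + 1 then runRest x t else runsFrom x x t
def runsOf : List Int → List (Int × Int)
  | [] => []
  | n :: t =>
    match runsOf t with
    | [] => [(n, n)]
    | (a, b) :: rs => if a = n + 1 then (n, b) :: rs else (n, n) :: (a, b) :: rs
theorem runsFrom_decomp (t : List Int) (s e : Int) :
    runsFrom s e t = (s, runEnd e t) :: runRest e t := by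
  induction t generalizing s e with
  | nil => simp [runsFrom, runEnd, runRest]
  | cons x t ih =>
    simp only [runsFrom, runEnd, runRest]
    split
    · exact ih s x
    · rfl
theorem runsOf_cons_eq (t : List Int) (n : Int) : runsOf (n :: t) = runsFrom n n t := by
  induction t generalizing n with
  | nil => simp [runsOf, runsFrom]
  | cons x t ih =>
    show (match runsOf (x :: t) with
      | [] => [(n, n)]
      | (a, b) :: rs => if a = n + 1 then (n, b) :: rs else (n, n) :: (a, b) :: rs) = _
    rw [ih x, runsFrom_decomp]
    simp only [runsFrom]
    rcases eq_or_ne x (n + 1) with h | h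
    · simp [h, runsFrom_decomp]
    · simp [h, runsFrom_decomp]

theorem starts_eq (ns : List Int) (h : ns.Pairwise (· < ·)) :
    ns.filter (fun n => !(decide ((n - 1) ∈ ns))) = (runsOf ns).map (fun p => p.1) := by
  induction ns with
  | nil => simp [runsOf]
  | cons n rest ih =>
    obtain ⟨hn, hr⟩ := List.pairwise_cons.mp h
    have ihr := ih hr
    have h1 : ¬ ((n : Int) - 1 ∈ n :: rest) := by
      intro hm
      rcases List.mem_cons.mp hm with e | hm'
      · omega
      · exact absurd (hn _ hm') (by omega)
    rw [List.filter_cons, if_pos (by simpa using h1)]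
    cases rest with
    | nil => simp [runsOf]
    | cons m t =>
      obtain ⟨hm, ht⟩ := List.pairwise_cons.mp hr
      have hnm : n < m := hn m (by simp)
      have hm1 : ¬ ((m : Int) - 1 ∈ m :: t) := by
        intro hmem
        rcases List.mem_cons.mp hmem with e | hm'
        · omega
        · exact absurd (hm _ hm') (by omega)
      have hcong : ∀ x ∈ t,
          (!(decide ((x - 1) ∈ n :: m :: t))) = (!(decide ((x - 1) ∈ m :: t))) := by
        intro x hx
        have hlt := hm x hx
        have hne : x - 1 ≠ n := by omega
        simp [List.mem_cons, hne]
      -- from ihr, peel off m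
      rw [List.filter_cons, if_pos (by simpa using hm1)] at ihr
      rw [runsOf_cons_eq t m, runsFrom_decomp] at ihr
      rw [List.map_cons] at ihr
      have htail := (List.cons_eq_cons.mp ihr).2
      by_cases hmn : m = n + 1
      · have hdrop : ((m : Int) - 1 ∈ n :: m :: t) := by
          have he : m - 1 = n := by omega
          simp [List.mem_cons, he]
        rw [List.filter_cons, if_neg (by simp [hdrop]),
            List.filter_congr hcong, htail]
        rw [runsOf_cons_eq (m :: t) n]
        simp only [runsFrom]
        rw [if_pos hmn, runsFrom_decomp]
        simp
      · have hkeep : ¬ ((m : Int) - 1 ∈ n :: m :: t) := by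
          intro hmem
          rcases List.mem_cons.mp hmem with e | hmem'
          · omega
          · exact hm1 hmem'
        rw [List.filter_cons, if_pos (by simpa using hkeep),
            List.filter_congr hcong, htail]
        rw [runsOf_cons_eq (m :: t) n]
        simp only [runsFrom]
        rw [if_neg (by omega), runsFrom_decomp]
        simp

theorem ends_eq (ns : List Int) (h : ns.Pairwise (· < ·)) :
    ns.filter (fun n => !(decide ((n + 1) ∈ ns))) = (runsOf ns).map (fun p => p.2) := by
  induction ns with
  | nil => simp [runsOf]
  | cons n rest ih =>
    obtain ⟨hn, hr⟩ := List.pairwise_cons.mp h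
    have ihr := ih hr
    have hcong : ∀ x ∈ rest,
        (!(decide ((x + 1) ∈ n :: rest))) = (!(decide ((x + 1) ∈ rest))) := by
      intro x hx
      have hlt := hn x hx
      have hne : x + 1 ≠ n := by omega
      simp [List.mem_cons, hne]
    rw [List.filter_cons]
    cases rest with
    | nil => simp [runsOf]
    | cons m t =>
      obtain ⟨hm, ht⟩ := List.pairwise_cons.mp hr
      have hnm : n < m := hn m (by simp)
      rw [List.filter_congr hcong, ihr, runsOf_cons_eq (m :: t) n]
      simp only [runsFrom]
      by_cases hmn : m = n + 1
      · have hdrop : ((n : Int) + 1 ∈ n :: m :: t) := by simp [List.mem_cons]; omega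
        rw [if_neg (by simp [hdrop]), if_pos hmn, runsFrom_decomp,
            runsOf_cons_eq t m, runsFrom_decomp]
        simp
      · have hkeep : ¬ ((n : Int) + 1 ∈ n :: m :: t) := by
          intro hmem
          rcases List.mem_cons.mp hmem with e | hmem'
          · omega
          · rcases List.mem_cons.mp hmem' with e | hmem''
            · omega
            · exact absurd (hm _ hmem'') (by omega)
        rw [if_pos (by simp [hkeep]), if_neg (by omega), runsFrom_decomp,
            runsOf_cons_eq t m, runsFrom_decomp]
        simp

theorem sweep_eq (t : List Int) (s e : Int) (acc : List String) :
    (let st := t.foldl (fun (st : List String × Int × Int) x =>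
        if x == st.2.2 + 1 then (st.1, st.2.1, x)
        else (st.1 ++ [renderRun (st.2.1, st.2.2)], x, x)) (acc, s, e)
     st.1 ++ [renderRun (st.2.1, st.2.2)]) = acc ++ (runsFrom s e t).map renderRun := by
  induction t generalizing s e acc with
  | nil => simp [runsFrom, renderRun]
  | cons x t ih =>
    simp only [List.foldl_cons, runsFrom]
    rcases eq_or_ne x (e + 1) with h | h
    · simpa [h] using ih s x acc
    · simpa [h] using ih x x (acc ++ [renderRun (s, e)])

theorem sorted_pairwise_lt {α : Type} [LinearOrder α] (s : List α) (h : s.Nodup) :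
    (PySem.List.sorted s (fun x => x)).Pairwise (· < ·) := by
  have hle := PySem.List.sorted_pairwise s (fun x => x)
  have hnd : (PySem.List.sorted s (fun x => x)).Nodup :=
    (PySem.List.sorted_perm s (fun x => x) false).nodup_iff.mpr h
  exact (hle.and hnd).imp (fun h => lt_of_le_of_ne h.1 h.2)

theorem sorted_nodup_congr {α : Type} [LinearOrder α] (s1 s2 : List α)
    (h1 : s1.Nodup) (h2 : s2.Nodup) (hm : ∀ x, x ∈ s1 ↔ x ∈ s2) :
    PySem.List.sorted s1 (fun x => x) = PySem.List.sorted s2 (fun x => x) := by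
  apply PySem.List.sorted_eq_of_perm_of_pairwise_lt
  · exact ((PySem.List.sorted_perm s2 (fun x => x) false).trans
      ((List.perm_ext_iff_of_nodup h2 h1).mpr (fun a => (hm a).symm)))
  · exact sorted_pairwise_lt s2 h2


theorem bodyA_eq_classify (d : PySem.Dict String (List (Option Int))) (name : String) :
    (let parts := rsplitDash1 name.toList
     if parts.length == 2 && PySem.Chars.strIsdigit (parts.getD 1 []) then
       d.modify (String.ofList (parts.getD 0 [])) []
         (fun l => l ++ [some ((PySem.Int.ofChars? (parts.getD 1 [])).getD 0)])
     else d.modify name [] (fun l => l ++ [none]))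
    = d.modify (classifyAlt name).1 [] (fun l => l ++ [(classifyAlt name).2]) := by
  simp only [rsplitDash1, classifyAlt]
  rcases eq_or_ne (PySem.Chars.rfind name.toList ['-']) (-1) with h | h
  · simp [h]
  · simp only [h, beq_iff_eq]
    by_cases hd : PySem.Chars.strIsdigit (PySem.List.slice name.toList (some (PySem.Chars.rfind name.toList ['-'] + 1))) = true <;>
      simp [hd]

theorem sweep_eq' (t : List Int) (s e : Int) (acc : List String) :
    (t.foldl (fun (st : List String × Int × Int) x =>
        if (x == st.2.2 + 1) = true then (st.1, st.2.1, x)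
        else (st.1 ++ [if (st.2.1 == st.2.2) = true then PySem.Int.toStr st.2.1
                       else PySem.Int.toStr st.2.1 ++ "-" ++ PySem.Int.toStr st.2.2], x, x)) (acc, s, e)).1 ++
      [if ((t.foldl (fun (st : List String × Int × Int) x =>
        if (x == st.2.2 + 1) = true then (st.1, st.2.1, x)
        else (st.1 ++ [if (st.2.1 == st.2.2) = true then PySem.Int.toStr st.2.1
                       else PySem.Int.toStr st.2.1 ++ "-" ++ PySem.Int.toStr st.2.2], x, x)) (acc, s, e)).2.1 ==
          (t.foldl (fun (st : List String × Int × Int) x =>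
        if (x == st.2.2 + 1) = true then (st.1, st.2.1, x)
        else (st.1 ++ [if (st.2.1 == st.2.2) = true then PySem.Int.toStr st.2.1
                       else PySem.Int.toStr st.2.1 ++ "-" ++ PySem.Int.toStr st.2.2], x, x)) (acc, s, e)).2.2) = true then
        PySem.Int.toStr (t.foldl (fun (st : List String × Int × Int) x =>
        if (x == st.2.2 + 1) = true then (st.1, st.2.1, x)
        else (st.1 ++ [if (st.2.1 == st.2.2) = true then PySem.Int.toStr st.2.1
                       else PySem.Int.toStr st.2.1 ++ "-" ++ PySem.Int.toStr st.2.2], x, x)) (acc, s, e)).2.1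
      else PySem.Int.toStr (t.foldl (fun (st : List String × Int × Int) x =>
        if (x == st.2.2 + 1) = true then (st.1, st.2.1, x)
        else (st.1 ++ [if (st.2.1 == st.2.2) = true then PySem.Int.toStr st.2.1
                       else PySem.Int.toStr st.2.1 ++ "-" ++ PySem.Int.toStr st.2.2], x, x)) (acc, s, e)).2.1 ++ "-" ++
        PySem.Int.toStr (t.foldl (fun (st : List String × Int × Int) x =>
        if (x == st.2.2 + 1) = true then (st.1, st.2.1, x)
        else (st.1 ++ [if (st.2.1 == st.2.2) = true then PySem.Int.toStr st.2.1
                       else PySem.Int.toStr st.2.1 ++ "-" ++ PySem.Int.toStr st.2.2], x, x)) (acc, s, e)).2.2]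
    = acc ++ (runsFrom s e t).map renderRun := by
  simpa [renderRun] using sweep_eq t s e acc

-- ===== VERDICT (by name: the statement is the Claim_ definition above) =====
theorem condense_nodelist_spec : Claim_equal_condense_nodelist := by
  intro xs _
  show condense_nodelist xs = condense_nodelist_alt xs
  unfold condense_nodelist condense_nodelist_alt
  by_cases he : xs.isEmpty = true
  · simp [he]
  by_cases hl : (xs.length == 1) = true
  · simp [he, hl]
  simp only [he, hl, if_false, Bool.false_eq_true]
  rw [PySem.List.foldl_congr_mem _ _ _ _ (fun acc x _ => bodyA_eq_classify acc x)]
  rw [← List.foldl_map (f := classifyAlt)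
      (g := fun (d : PySem.Dict String (List (Option Int))) (p : String × Option Int) =>
        d.modify p.1 [] (fun l => l ++ [p.2]))]
  rw [PySem.Dict.keys_foldl_modify_key ((PySem.List.sorted xs (fun x => x)).map classifyAlt)
      (fun p => p.1) [] (fun d p => fun l => l ++ [p.2]) PySem.Dict.empty]
  have hgetD : ∀ k, (List.foldl (fun (d : PySem.Dict String (List (Option Int))) p =>
        d.modify p.1 [] fun l => l ++ [p.2]) PySem.Dict.empty
        (List.map classifyAlt (PySem.List.sorted xs fun x => x))).getD k []
      = List.map (fun p => p.2) (List.filter (fun p => p.1 == k)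
          (List.map classifyAlt (PySem.List.sorted xs fun x => x))) := by
    intro k
    rw [PySem.Dict.getD_foldl_modify_append]
    simp
  simp only [hgetD]
  have hkeys : PySem.List.sorted (PySem.Set.update (PySem.Dict.empty (κ := String) (ν := List (Option Int))).keys
        ((List.map classifyAlt (PySem.List.sorted xs fun x => x)).map (fun p => p.1))) (fun x => x)
      = PySem.List.sorted (PySem.Set.ofList ((List.map classifyAlt xs).map (fun p => p.1))) (fun x => x) := by
    rw [PySem.Dict.keys_empty]
    show PySem.List.sorted (PySem.Set.ofList _) _ = _
    apply sorted_nodup_congr _ _ (PySem.Set.nodup_ofList _) (PySem.Set.nodup_ofList _)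
    intro x
    rw [PySem.Set.mem_ofList, PySem.Set.mem_ofList]
    exact (((PySem.List.sorted_perm xs _ false).map classifyAlt).map _).mem_iff
  rw [hkeys]
  -- B's dict fold over the unsorted input, same treatment
  rw [← List.foldl_map (f := classifyAlt)
      (g := fun (d : PySem.Dict String (List (Option Int))) (p : String × Option Int) =>
        d.modify p.1 [] (fun l => l ++ [p.2]))]
  have hgetDB : ∀ k, (List.foldl (fun (d : PySem.Dict String (List (Option Int))) p =>
        d.modify p.1 [] fun l => l ++ [p.2]) PySem.Dict.empty
        (List.map classifyAlt xs)).getD k []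
      = List.map (fun p => p.2) (List.filter (fun p => p.1 == k)
          (List.map classifyAlt xs)) := by
    intro k
    rw [PySem.Dict.getD_foldl_modify_append]
    simp
  simp only [hgetDB]
  rw [PySem.Dict.keys_foldl_modify_key (List.map classifyAlt xs)
      (fun p => p.1) [] (fun d p => fun l => l ++ [p.2]) PySem.Dict.empty]
  have hkeysB : PySem.List.sorted (PySem.Set.update (PySem.Dict.empty (κ := String) (ν := List (Option Int))).keys
        ((List.map classifyAlt xs).map (fun p => p.1))) (fun x => x)
      = PySem.List.sorted (PySem.Set.ofList ((List.map classifyAlt xs).map (fun p => p.1))) (fun x => x) := by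
    rw [PySem.Dict.keys_empty]
    rfl
  rw [hkeysB]
  refine congrArg (PySem.Str.join ",") ?_
  apply PySem.List.foldl_congr_mem
  intro acc key hk
  set numbers := List.map (fun p => p.2) (List.filter (fun p => p.1 == key)
      (List.map classifyAlt (PySem.List.sorted xs fun x => x))) with hnumbers
  set l2 := List.map (fun p => p.2) (List.filter (fun p => p.1 == key)
      (List.map classifyAlt xs)) with hl2
  have hpl : numbers.Perm l2 :=
    (((PySem.List.sorted_perm xs _ false).map classifyAlt).filter _).map _
  have hcont : numbers.contains none = PySem.Set.contains (PySem.Set.ofList l2) none := by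
    rw [Bool.eq_iff_iff, List.contains_iff_mem, PySem.Set.contains_iff, PySem.Set.mem_ofList]
    exact hpl.mem_iff
  rw [hcont]
  by_cases hnone : PySem.Set.contains (PySem.Set.ofList l2) none = true
  · have h' : none ∈ l2 := (PySem.Set.mem_ofList _ _).mp ((PySem.Set.contains_iff _ _).mp hnone)
    simp [h']
  simp only [hnone, Bool.false_eq_true, if_false]
  have hnd2 : (List.filterMap (fun x => x) (PySem.Set.ofList l2)).Nodup :=
    List.Nodup.filterMap (by intro a a' b hb hb'; cases a <;> cases a' <;> simp_all)
      (PySem.Set.nodup_ofList _)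
  have hmemchain : ∀ (x : Int), x ∈ List.filterMap (fun x => x) numbers ↔
      x ∈ List.filterMap (fun x => x) (PySem.Set.ofList l2) := by
    intro x
    simp only [List.mem_filterMap]
    constructor
    · rintro ⟨a, ha, rfl⟩
      exact ⟨_, (PySem.Set.mem_ofList _ _).mpr (hpl.mem_iff.mp ha), rfl⟩
    · rintro ⟨a, ha, rfl⟩
      exact ⟨_, hpl.mem_iff.mpr ((PySem.Set.mem_ofList _ _).mp ha), rfl⟩
  have hns : PySem.List.sorted (PySem.Set.ofList (List.filterMap (fun x => x) numbers)) (fun x => x)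
      = PySem.List.sorted (List.filterMap (fun x => x) (PySem.Set.ofList l2)) (fun x => x) := by
    apply sorted_nodup_congr _ _ (PySem.Set.nodup_ofList _) hnd2
    intro x
    rw [PySem.Set.mem_ofList]
    exact hmemchain x
  rw [hns]
  set ns := PySem.List.sorted (List.filterMap (fun x => x) (PySem.Set.ofList l2)) (fun x => x) with hnsdef
  have hlt : ns.Pairwise (· < ·) := sorted_pairwise_lt _ hnd2
  have hmemns : ∀ (x : Int), x ∈ ns ↔ PySem.Set.contains (PySem.Set.ofList l2) (some x) = true := by
    intro x
    rw [hnsdef, PySem.List.mem_sorted, PySem.Set.contains_iff, List.mem_filterMap]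
    simp
  by_cases hlen : (ns.length == 1) = true
  · simp [hlen]
  simp only [hlen, Bool.false_eq_true, if_false]
  -- ns is nonempty
  have hnemem : ∃ v : Int, v ∈ ns := by
    rw [PySem.List.mem_sorted _ _ false key] at hk
    obtain ⟨p, hp, hp1⟩ := List.mem_map.mp ((PySem.Set.mem_ofList _ _).mp hk)
    have hp2 : p.2 ∈ l2 := List.mem_map.mpr ⟨p, List.mem_filter.mpr ⟨hp, by simp [hp1]⟩, rfl⟩
    obtain ⟨v, hv⟩ : ∃ v, p.2 = some v := by
      cases hpv : p.2 with
      | none =>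
        exact absurd ((PySem.Set.contains_iff _ _).mpr
          ((PySem.Set.mem_ofList _ _).mpr (hpv ▸ hp2))) hnone
      | some v => exact ⟨v, rfl⟩
    refine ⟨v, ?_⟩
    rw [hnsdef, PySem.List.mem_sorted, List.mem_filterMap]
    exact ⟨some v, (PySem.Set.mem_ofList _ _).mpr (hv ▸ hp2), rfl⟩
  obtain ⟨n, t, hc⟩ : ∃ n t, ns = n :: t := by
    cases hx : ns with
    | nil => obtain ⟨v, hv⟩ := hnemem; rw [hx] at hv; cases hv
    | cons n t => exact ⟨n, t, rfl⟩
  -- A side: index fold to element fold, then to runsOf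
  rw [PySem.List.foldl_pyRange_pyGetD ns 0
      (fun (st : List String × Int × Int) x =>
        if (x == st.2.2 + 1) = true then (st.1, st.2.1, x)
        else (st.1 ++ [if (st.2.1 == st.2.2) = true then PySem.Int.toStr st.2.1
                       else PySem.Int.toStr st.2.1 ++ "-" ++ PySem.Int.toStr st.2.2], x, x))
      ([], ns.headD 0, ns.headD 0) (by norm_num)]
  rw [show ((1 : Int).toNat = 1) from rfl]
  rw [sweep_eq' (ns.drop 1) (ns.headD 0) (ns.headD 0) []]
  have hruns : runsFrom (ns.headD 0) (ns.headD 0) (ns.drop 1) = runsOf ns := by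
    rw [hc]; exact (runsOf_cons_eq t n).symm
  rw [hruns]
  -- B side: boundary filters to runsOf
  have hstarts : ns.filter (fun x => !(PySem.Set.ofList l2).contains (some (x - 1)))
      = (runsOf ns).map (fun p => p.1) := by
    rw [List.filter_congr (fun x _ => by
      rw [show ((PySem.Set.ofList l2).contains (some (x - 1)) = decide ((x - 1) ∈ ns)) from by
        rw [Bool.eq_iff_iff, decide_eq_true_iff, hmemns]])]
    exact starts_eq ns hlt
  have hends : ns.filter (fun x => !(PySem.Set.ofList l2).contains (some (x + 1)))
      = (runsOf ns).map (fun p => p.2) := by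
    rw [List.filter_congr (fun x _ => by
      rw [show ((PySem.Set.ofList l2).contains (some (x + 1)) = decide ((x + 1) ∈ ns)) from by
        rw [Bool.eq_iff_iff, decide_eq_true_iff, hmemns]])]
    exact ends_eq ns hlt
  rw [hstarts, hends, List.zip_map']
  have hmapeq : List.map renderRun (runsOf ns) =
      List.map (fun (ab : Int × Int) => if (ab.1 == ab.2) = true then PySem.Int.toStr ab.1
        else PySem.Int.toStr ab.1 ++ "-" ++ PySem.Int.toStr ab.2) (runsOf ns) :=
    List.map_congr_left (fun p _ => by simp [renderRun])
  simp [hmapeq]
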